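-- pv_equiv track=rewrite | github.com/imbue-ai/mng | scripts/benchmark_create_message.py | verify_message_in_pane
-- ===== SOURCE A (Python) =====
-- def verify_message_in_pane(pane_content: str, expected_message: str) -> tuple[bool, bool, bool]:
--     """Verify the message appears correctly in the pane.
--
--     Returns (message_correct, message_truncated, extra_newlines)
--     """
--     # The message should appear in Claude's conversation after the prompt symbol
--     # Look for the message after a prompt indicator like ">" or the input area
--     lines = pane_content.split("\n")
--
--     message_found = False
--     message_truncated = False
--     extra_newlines = False
--
--     for i, line in enumerate(lines):
--         # Look for the exact message in the pane
--         if expected_message in line: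
--             message_found = True
--             # Check for extra newlines - if the message appears across multiple lines
--             # when it shouldn't, that indicates Enter was interpreted as newline
--             break
--         # Check for truncated message (first part appears but not the full thing)
--         if len(expected_message) > 5 and expected_message[:5] in line and expected_message not in line:
--             message_truncated = True
--
--     # Check for extra blank lines or newlines in the input area
--     # This is a heuristic - look for the message split across lines
--     for i, line in enumerate(lines):
--         if expected_message[:10] in line if len(expected_message) >= 10 else expected_message in line:
--             # Check if continuation of message is on next line (indicating unwanted newline)
--             if i + 1 < len(lines) and len(expected_message) > 10:
--                 next_line = lines[i + 1].strip()
--                 # If part of message continues on next line, that's an extra newline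
--                 if next_line and expected_message[10:20] in next_line:
--                     extra_newlines = True
--             break
--
--     return message_found, message_truncated, extra_newlines
-- ===== SOURCE B (Python) =====
-- def verify_message_in_pane(pane_content: str, expected_message: str) -> tuple[bool, bool, bool]:
--     """Single fused pass: one walk over the lines with two independent
--     done-flags replacing A's two staged break-loops; stops as soon as both
--     sub-searches have finished."""
--     lines = pane_content.split("\n")
--     msg = expected_message
--     probe = msg[:10] if len(msg) >= 10 else msg
--
--     found = truncated = extra = False
--     done_found = done_newlines = False
--     i = 0
--     while i < len(lines) and not (done_found and done_newlines):
--         line = lines[i]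
--         if not done_found:
--             if msg in line:
--                 found = True
--                 done_found = True
--             elif len(msg) > 5 and msg[:5] in line:
--                 truncated = True
--         if not done_newlines:
--             if probe in line:
--                 if i + 1 < len(lines) and len(msg) > 10:
--                     nl = lines[i + 1].strip()
--                     if nl and msg[10:20] in nl:
--                         extra = True
--                 done_newlines = True
--         i += 1
--     return found, truncated, extra
-- ===== Notes on version B (the rewrite author's own statement) =====
-- stated objective: alternative
-- what changed: Fused A's two staged break-loops over the lines into one single pass that carries two independent done-flags (message search and newline-heuristic search) and stops as soon as both sub-searches are finished, so the lines are traversed once instead of twice.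
import Mathlib
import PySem

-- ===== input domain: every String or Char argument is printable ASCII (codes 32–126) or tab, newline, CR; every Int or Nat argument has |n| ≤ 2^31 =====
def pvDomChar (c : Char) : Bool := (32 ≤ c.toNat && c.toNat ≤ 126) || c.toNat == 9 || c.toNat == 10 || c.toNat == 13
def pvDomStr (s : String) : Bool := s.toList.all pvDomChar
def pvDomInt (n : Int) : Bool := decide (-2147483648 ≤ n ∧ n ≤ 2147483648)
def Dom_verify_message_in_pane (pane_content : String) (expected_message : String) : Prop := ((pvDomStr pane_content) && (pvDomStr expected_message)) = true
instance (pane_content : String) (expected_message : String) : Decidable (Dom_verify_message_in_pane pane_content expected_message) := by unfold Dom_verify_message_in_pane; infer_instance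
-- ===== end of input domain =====

-- B fuses A's two staged break-loops into one pass with two independent done-flags (alternative decomposition, same cost).

-- ===== PORT A =====
-- first loop of A: walk the lines, breaking at the first line containing msg;
-- 'trunc' is the message_truncated accumulator; returns (message_found, message_truncated)
def pvA_loop1 (msg : String) : List String → Bool → Bool × Bool
  | [], trunc => (false, trunc)
  | line :: rest, trunc =>
    if PySem.Str.isIn msg line then (true, trunc)
    else if decide (PySem.Str.len msg > 5)
            && PySem.Str.isIn (PySem.Str.slice msg none (some 5)) line
            && !(PySem.Str.isIn msg line) then
      pvA_loop1 msg rest true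
    else
      pvA_loop1 msg rest trunc

-- second loop of A: break at the first line matching the conditional-expression test,
-- then inspect the next line; returns extra_newlines
def pvA_loop2 (msg : String) : List String → Bool
  | [] => false
  | line :: rest =>
    if (if decide (PySem.Str.len msg ≥ 10) then
          PySem.Str.isIn (PySem.Str.slice msg none (some 10)) line
        else PySem.Str.isIn msg line) then
      -- 'i + 1 < len(lines)' ↔ rest is nonempty
      match rest with
      | [] => false
      | next :: _ =>
        if decide (PySem.Str.len msg > 10) then
          let next_line := PySem.Str.strip next
          decide (next_line ≠ "")
            && PySem.Str.isIn (PySem.Str.slice msg (some 10) (some 20)) next_line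
        else false
    else
      pvA_loop2 msg rest

def verify_message_in_pane (pane_content : String) (expected_message : String) : Bool × Bool × Bool :=
  -- pane_content.split("\n"); the separator is nonempty so split? is always `some`
  let lines : List String := (PySem.Str.split? pane_content "\n").getD []
  let r := pvA_loop1 expected_message lines false
  (r.1, r.2, pvA_loop2 expected_message lines)

-- ===== PORT B =====
-- Source B's while loop: one pass over the remaining lines carrying
-- (found, trunc, extra) and the two done-flags d1 (message search) and d2 (newline search)
def pvB_go (msg probe : String) : List String → Bool → Bool → Bool → Bool → Bool → Bool × Bool × Bool
  | [], found, trunc, extra, _d1, _d2 => (found, trunc, extra)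
  | line :: tail, found, trunc, extra, d1, d2 =>
    if d1 && d2 then (found, trunc, extra)
    else
      let s1 : Bool × Bool × Bool :=        -- (found, trunc, d1) after this line
        if d1 then (found, trunc, d1)
        else if PySem.Str.isIn msg line then (true, trunc, true)
        else if decide (PySem.Str.len msg > 5)
                && PySem.Str.isIn (PySem.Str.slice msg none (some 5)) line then
          (found, true, d1)
        else (found, trunc, d1)
      let s2 : Bool × Bool :=               -- (extra, d2) after this line
        if d2 then (extra, d2)
        else if PySem.Str.isIn probe line then
          ((match tail with
            | [] => extra                   -- i + 1 < len(lines) fails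
            | next :: _ =>
              if decide (PySem.Str.len msg > 10) then
                let nl := PySem.Str.strip next
                if decide (nl ≠ "")
                    && PySem.Str.isIn (PySem.Str.slice msg (some 10) (some 20)) nl then
                  true
                else extra
              else extra), true)
        else (extra, d2)
      pvB_go msg probe tail s1.1 s1.2.1 s2.1 s1.2.2 s2.2

def verify_message_in_pane_alt (pane_content : String) (expected_message : String) : Bool × Bool × Bool :=
  let lines : List String := (PySem.Str.split? pane_content "\n").getD []
  let msg := expected_message
  let probe := if decide (PySem.Str.len msg ≥ 10) then PySem.Str.slice msg none (some 10) else msg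
  pvB_go msg probe lines false false false false false

-- ===== PRECONDITION & SPEC =====
def Spec_verify_message_in_pane (pane_content : String) (expected_message : String) (out : Bool × Bool × Bool) : Prop := out = verify_message_in_pane_alt pane_content expected_message
instance (pane_content : String) (expected_message : String) (out : Bool × Bool × Bool) : Decidable (Spec_verify_message_in_pane pane_content expected_message out) := by unfold Spec_verify_message_in_pane; infer_instance

-- ===== CLAIM (what is proved, stated in full; the proofs are below) =====
def Claim_equal_verify_message_in_pane : Prop := ∀ (pane_content : String) (expected_message : String), Dom_verify_message_in_pane pane_content expected_message → Spec_verify_message_in_pane pane_content expected_message (verify_message_in_pane pane_content expected_message)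

-- ===== LEMMAS AND PROOFS =====

-- one-step unfolding of the fused pass (definitional)
theorem pvB_go_cons (msg probe line : String) (tail : List String)
    (found trunc extra d1 d2 : Bool) :
    pvB_go msg probe (line :: tail) found trunc extra d1 d2 =
      (if d1 && d2 then (found, trunc, extra)
       else
         let s1 : Bool × Bool × Bool :=
           if d1 then (found, trunc, d1)
           else if PySem.Str.isIn msg line then (true, trunc, true)
           else if decide (PySem.Str.len msg > 5)
                   && PySem.Str.isIn (PySem.Str.slice msg none (some 5)) line then
             (found, true, d1)
           else (found, trunc, d1)
         let s2 : Bool × Bool :=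
           if d2 then (extra, d2)
           else if PySem.Str.isIn probe line then
             ((match tail with
               | [] => extra
               | next :: _ =>
                 if decide (PySem.Str.len msg > 10) then
                   let nl := PySem.Str.strip next
                   if decide (nl ≠ "")
                       && PySem.Str.isIn (PySem.Str.slice msg (some 10) (some 20)) nl then
                     true
                   else extra
                 else extra), true)
           else (extra, d2)
         pvB_go msg probe tail s1.1 s1.2.1 s2.1 s1.2.2 s2.2) := rfl

-- the fused pass with done-flags equals the two staged loops run on the whole list:
-- each done-flag freezes its components, otherwise the pass or-accumulates the loops' results
set_option maxHeartbeats 2000000 in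
theorem pvB_go_eq (msg probe : String) (lines : List String)
    (found trunc extra d1 d2 : Bool)
    (hprobe : probe = if decide (PySem.Str.len msg ≥ 10) then PySem.Str.slice msg none (some 10) else msg) :
    pvB_go msg probe lines found trunc extra d1 d2 =
      ((if d1 then found else found || (pvA_loop1 msg lines trunc).1),
       (if d1 then trunc else (pvA_loop1 msg lines trunc).2),
       (if d2 then extra else extra || pvA_loop2 msg lines)) := by
  induction lines generalizing found trunc extra d1 d2 with
  | nil => cases d1 <;> cases d2 <;> simp [pvB_go, pvA_loop1, pvA_loop2]
  | cons line tail ih =>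
    rw [pvB_go_cons]
    cases d1 <;> cases d2
    · -- d1 = false, d2 = false
      rw [if_neg (by decide)]
      simp only []
      rw [ih]; clear ih
      by_cases h10 : 10 ≤ msg.length
      · by_cases hgt : 10 < msg.length <;>
        by_cases h1 : PySem.Str.isIn msg line = true <;>
        by_cases h2 : PySem.Str.isIn (PySem.Str.slice msg none (some 10)) line = true <;>
        cases tail <;>
          simp_all [pvA_loop1, pvA_loop2, hprobe, Bool.or_assoc, Bool.or_comm, Bool.or_left_comm] <;> try (split_ifs <;> try simp_all <;> try omega) <;> try omega
      · have hgt : ¬ 10 < msg.length := by omega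
        by_cases h1 : PySem.Str.isIn msg line = true <;>
        cases tail <;>
          simp_all [pvA_loop1, pvA_loop2, hprobe, Bool.or_assoc, Bool.or_comm, Bool.or_left_comm] <;> try (split_ifs <;> try simp_all <;> try omega) <;> try omega
    · -- d1 = false, d2 = true
      rw [if_neg (by decide)]
      simp only []
      rw [ih]; clear ih
      by_cases h1 : PySem.Str.isIn msg line = true <;>
        simp_all [pvA_loop1, Bool.or_assoc, Bool.or_comm, Bool.or_left_comm] <;> try (split_ifs <;> try simp_all <;> try omega) <;> try omega
    · -- d1 = true, d2 = false
      rw [if_neg (by decide)]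
      simp only []
      rw [ih]; clear ih
      by_cases h10 : 10 ≤ msg.length
      · by_cases hgt : 10 < msg.length <;>
        by_cases h2 : PySem.Str.isIn (PySem.Str.slice msg none (some 10)) line = true <;>
        cases tail <;>
          simp_all [pvA_loop2, hprobe, Bool.or_assoc, Bool.or_comm, Bool.or_left_comm] <;> try (split_ifs <;> try simp_all <;> try omega) <;> try omega
      · have hgt : ¬ 10 < msg.length := by omega
        by_cases h1 : PySem.Str.isIn msg line = true <;>
        cases tail <;>
          simp_all [pvA_loop2, hprobe, Bool.or_assoc, Bool.or_comm, Bool.or_left_comm] <;> try (split_ifs <;> try simp_all <;> try omega) <;> try omega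
    · -- both done: early exit
      simp

-- ===== VERDICT (by name: the statement is the Claim_ definition above) =====
theorem verify_message_in_pane_spec : Claim_equal_verify_message_in_pane := by
  intro pane_content expected_message _
  unfold Spec_verify_message_in_pane verify_message_in_pane verify_message_in_pane_alt
  rw [pvB_go_eq _ _ _ _ _ _ _ _ rfl]
  simp
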